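-- pv_equiv track=rewrite | github.com/gennis2008/python_workspace | CrazyPythonTalkLiGang/part05/Section5.3/local_function_test.py | get_mat_func
-- ===== SOURCE A (Python) =====
-- def get_mat_func(type,nn):
--     def square(n):
--         return n*n
--     def cube(n):
--         return n*n*n
--     def factorial(n):
--         result = 1
--         for index in range(2,n+1):
--             result *= index
--         return result
--     if type == "square":
--         return square(nn)
--     elif type =="cube":
--         return cube(nn)
--     else:
--         return factorial(nn)
-- ===== SOURCE B (Python) =====
-- def _prod(lo, hi):
--     # product of all integers in the inclusive range [lo, hi] by binary splitting
--     if lo > hi: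
--         return 1
--     if lo == hi:
--         return lo
--     mid = (lo + hi) // 2
--     return _prod(lo, mid) * _prod(mid + 1, hi)
--
-- def get_mat_func(type, nn):
--     if type == "square":
--         return nn * nn
--     if type == "cube":
--         return nn * nn * nn
--     return _prod(2, nn)
-- ===== Notes on version B (the rewrite author's own statement) =====
-- stated objective: faster
-- what changed: The factorial branch computes the product of [2..nn] by divide-and-conquer binary splitting (recursively multiplying the two half-range products) instead of A's left-to-right accumulator loop; square and cube are returned directly.
import Mathlib
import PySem

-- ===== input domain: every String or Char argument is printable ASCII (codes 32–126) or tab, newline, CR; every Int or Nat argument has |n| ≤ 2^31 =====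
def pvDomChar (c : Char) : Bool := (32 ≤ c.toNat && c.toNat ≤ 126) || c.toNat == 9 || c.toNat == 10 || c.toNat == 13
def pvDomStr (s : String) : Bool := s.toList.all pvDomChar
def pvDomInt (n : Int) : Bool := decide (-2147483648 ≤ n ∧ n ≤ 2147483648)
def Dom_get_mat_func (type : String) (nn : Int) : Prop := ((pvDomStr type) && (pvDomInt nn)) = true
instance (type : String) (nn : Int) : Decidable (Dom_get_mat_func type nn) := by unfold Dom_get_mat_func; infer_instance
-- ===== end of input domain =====

-- B replaces A's left-to-right factorial accumulator loop by a divide-and-conquer binary-splitting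
-- product of [2..nn]; measurably faster on large nn because big-int operands stay balanced.


-- ===== PORT A =====
def pvA_square (n : Int) : Int := n * n
def pvA_cube (n : Int) : Int := n * n * n
def pvA_factorial (n : Int) : Int :=
  (PySem.List.pyRange 2 (n + 1) 1).foldl (fun result index => result * index) 1

def get_mat_func (type : String) (nn : Int) : Int :=
  if type == "square" then pvA_square nn
  else if type == "cube" then pvA_cube nn
  else pvA_factorial nn

-- ===== PORT B =====
-- product of all integers in the inclusive range [lo, hi] by binary splitting
def pvB_prod (lo hi : Int) : Int :=
  if _h1 : hi < lo then 1
  else if _h2 : lo = hi then lo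
  else
    pvB_prod lo (PySem.Int.floordiv (lo + hi) 2) *
      pvB_prod (PySem.Int.floordiv (lo + hi) 2 + 1) hi
termination_by (hi - lo).toNat
decreasing_by
  all_goals
    obtain ⟨hm1, _⟩ := PySem.Int.floordiv_two_mid_bounds (lo := lo) (hi := hi) (by omega)
    have hmlt : PySem.Int.floordiv (lo + hi) 2 < hi :=
      (PySem.Int.floordiv_lt_iff_lt_mul (by omega)).mpr (by omega)
    omega

def get_mat_func_alt (type : String) (nn : Int) : Int :=
  if type == "square" then nn * nn
  else if type == "cube" then nn * nn * nn
  else pvB_prod 2 nn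

-- ===== PRECONDITION & SPEC =====
def Spec_get_mat_func (type : String) (nn : Int) (out : Int) : Prop := out = get_mat_func_alt type nn
instance (type : String) (nn : Int) (out : Int) : Decidable (Spec_get_mat_func type nn out) := by unfold Spec_get_mat_func; infer_instance

-- ===== CLAIM (what is proved, stated in full; the proofs are below) =====
def Claim_equal_get_mat_func : Prop := ∀ (type : String) (nn : Int), Dom_get_mat_func type nn → Spec_get_mat_func type nn (get_mat_func type nn)

-- ===== LEMMAS AND PROOFS =====
-- running a multiplicative fold from accumulator r factors r out
theorem foldl_mul_acc (xs : List Int) (r : Int) :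
    xs.foldl (fun a x => a * x) r = r * xs.foldl (fun a x => a * x) 1 := by
  induction xs generalizing r with
  | nil => simp
  | cons x xs ih =>
    simp only [List.foldl_cons]
    rw [ih (r * x), ih (1 * x)]; ring

-- binary splitting computes the fold over the inclusive range [lo, hi]
theorem pvB_prod_eq (lo hi : Int) :
    pvB_prod lo hi = (PySem.List.pyRange lo (hi + 1) 1).foldl (fun a x => a * x) 1 := by
  by_cases h1 : hi < lo
  · rw [pvB_prod, dif_pos h1, PySem.List.pyRange_one_eq_nil (by omega)]; rfl
  · by_cases h2 : lo = hi
    · subst h2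
      rw [pvB_prod, dif_neg h1, dif_pos rfl, PySem.List.pyRange_one_singleton]
      simp
    · obtain ⟨hm1, hm2⟩ := PySem.Int.floordiv_two_mid_bounds (lo := lo) (hi := hi) (by omega)
      have hmlt : PySem.Int.floordiv (lo + hi) 2 < hi :=
        (PySem.Int.floordiv_lt_iff_lt_mul (by omega)).mpr (by omega)
      rw [pvB_prod, dif_neg h1, dif_neg h2]
      set mid := PySem.Int.floordiv (lo + hi) 2 with hmid
      rw [PySem.List.pyRange_one_append lo (mid + 1) (hi + 1) (by omega) (by omega),
          List.foldl_append, foldl_mul_acc,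
          ← pvB_prod_eq lo mid, ← pvB_prod_eq (mid + 1) hi]
termination_by (hi - lo).toNat
decreasing_by all_goals omega

-- ===== VERDICT (by name: the statement is the Claim_ definition above) =====
theorem get_mat_func_spec : Claim_equal_get_mat_func := by
  intro type nn _
  unfold Spec_get_mat_func get_mat_func get_mat_func_alt pvA_square pvA_cube pvA_factorial
  split_ifs <;> simp [pvB_prod_eq]
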